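-- pv_equiv track=rewrite | github.com/jojkos/calendarPuzzle | solver.py | find_contiguous_regions
-- ===== SOURCE A (Python) =====
-- from collections import deque
--
-- def is_valid(grid, r, c, blocked_areas):
--     """
--     Return True if row r and column c are in-bounds for grid[r],
--     and that cell is not blocked.
--     """
--     if r < 0 or r >= len(grid):
--         return False
--     if c < 0 or c >= len(grid[r]):
--         return False
--     # Check for blocked
--     if (r, c) in blocked_areas:
--         return False
--     return True
--
-- def find_contiguous_regions(grid, blocked_areas):
--     rows = len(grid)
--     visited = []
--     for r in range(rows):
--         visited.append([False] * len(grid[r]))  # visited[r] has same width as grid[r]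
--     directions = [(1,0), (-1,0), (0,1), (0,-1)]
--     regions = []
--
--     for r in range(rows):
--         for c in range(len(grid[r])):  # only iterate up to len(grid[r])
--             if not visited[r][c] and grid[r][c] == 0 and (r,c) not in blocked_areas:
--                 # BFS/DFS to find all connected empty cells
--                 queue = deque([(r, c)])
--                 visited[r][c] = True
--                 size = 0
--
--                 while queue:
--                     x, y = queue.popleft()
--                     size += 1
--                     for dx, dy in directions:
--                         nx, ny = x + dx, y + dy
--                         if is_valid(grid, nx, ny, blocked_areas):
--                             if not visited[nx][ny] and grid[nx][ny] == 0:
--                                 visited[nx][ny] = True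
--                                 queue.append((nx, ny))
--
--                 regions.append(size)
--     return regions
-- ===== SOURCE B (Python) =====
-- def _open(grid, r, c, blocked_areas):
--     return (0 <= r < len(grid) and 0 <= c < len(grid[r])
--             and grid[r][c] == 0 and (r, c) not in blocked_areas)
--
-- def find_contiguous_regions(grid, blocked_areas):
--     # Fixpoint-closure flood: grow each region as a set until it stops growing,
--     # instead of A's queue-based BFS with a visited matrix.
--     regions = []
--     visited = set()
--     for r in range(len(grid)):
--         for c in range(len(grid[r])):
--             if (r, c) not in visited and _open(grid, r, c, blocked_areas):
--                 comp = {(r, c)}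
--                 while True:
--                     grown = set(comp)
--                     for (x, y) in comp:
--                         for (nx, ny) in ((x+1, y), (x-1, y), (x, y+1), (x, y-1)):
--                             if _open(grid, nx, ny, blocked_areas):
--                                 grown.add((nx, ny))
--                     if len(grown) == len(comp):
--                         break
--                     comp = grown
--                 regions.append(len(comp))
--                 visited |= comp
--     return regions
-- ===== Notes on version B (the rewrite author's own statement) =====
-- stated objective: alternative
-- what changed: Replaces the queue-based BFS with a per-cell visited matrix by a set-fixpoint flood: each region is grown as a coordinate set by repeatedly adding open neighbors until the set stops growing, and the global visited state is a plain set of coordinates instead of a ragged boolean matrix.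
import Mathlib
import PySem

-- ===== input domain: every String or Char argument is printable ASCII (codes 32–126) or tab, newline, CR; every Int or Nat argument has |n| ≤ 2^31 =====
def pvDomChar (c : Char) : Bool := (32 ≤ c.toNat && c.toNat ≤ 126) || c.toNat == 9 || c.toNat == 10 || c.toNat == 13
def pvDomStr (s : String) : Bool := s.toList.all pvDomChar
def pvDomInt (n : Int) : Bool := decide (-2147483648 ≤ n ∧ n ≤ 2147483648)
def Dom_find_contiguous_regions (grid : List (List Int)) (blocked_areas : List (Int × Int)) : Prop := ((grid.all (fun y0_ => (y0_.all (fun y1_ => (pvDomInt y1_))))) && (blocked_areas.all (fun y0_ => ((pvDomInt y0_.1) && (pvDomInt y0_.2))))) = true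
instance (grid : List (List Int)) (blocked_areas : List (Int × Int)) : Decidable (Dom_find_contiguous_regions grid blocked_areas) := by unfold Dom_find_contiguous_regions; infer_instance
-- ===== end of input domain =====

-- B replaces A's queue-based BFS over a ragged visited matrix by a set-fixpoint flood
-- (grow each region as a coordinate set until it stops growing); alternative, not faster.

-- ===== PORT A =====
-- shared index accessors (grid[r], grid[r][c])
def pvRow (grid : List (List Int)) (r : Int) : List Int := PySem.List.pyGetD grid r []
def pvCell (grid : List (List Int)) (r c : Int) : Int := PySem.List.pyGetD (pvRow grid r) c 1

-- visited[r][c] reads / writes (defaults never reached in executions: guarded by bounds checks)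
def pvVGet (v : List (List Bool)) (r c : Int) : Bool :=
  PySem.List.pyGetD (PySem.List.pyGetD v r []) c true
def pvVSet (v : List (List Bool)) (r c : Int) : List (List Bool) :=
  PySem.List.pySetD v r (PySem.List.pySetD (PySem.List.pyGetD v r []) c true)

def is_valid (grid : List (List Int)) (r c : Int) (blocked_areas : List (Int × Int)) : Bool :=
  if r < 0 || (grid.length : Int) ≤ r then false
  else if c < 0 || ((pvRow grid r).length : Int) ≤ c then false
  else if blocked_areas.contains (r, c) then false
  else true

-- number of still-false entries of the visited matrix (termination measure only)
def pvFalse (v : List (List Bool)) : Nat := (v.map (fun row => row.count false)).sum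

-- one BFS pop: scan the 4 directions, marking and enqueueing fresh empty cells
def pvBfsStep (grid : List (List Int)) (blocked_areas : List (Int × Int)) (x y : Int)
    (st : List (List Bool) × List (Int × Int)) (d : Int × Int) :
    List (List Bool) × List (Int × Int) :=
  let nx := x + d.1
  let ny := y + d.2
  if is_valid grid nx ny blocked_areas then
    if !pvVGet st.1 nx ny && (pvCell grid nx ny == 0) then
      (pvVSet st.1 nx ny, st.2 ++ [(nx, ny)])
    else st
  else st


theorem count_false_set_lt (row : List Bool) (j : Nat) (hj : j < row.length) (hf : row[j] = false) :
    (row.set j true).count false < row.count false := by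
  induction row generalizing j with
  | nil => simp at hj
  | cons a t ih =>
    cases j with
    | zero => simp at hf; subst hf; simp
    | succ j =>
      simp only [List.set_cons_succ, List.count_cons]
      have := ih j (by simpa using hj) (by simpa using hf)
      omega

theorem pvFalse_set_lt (v : List (List Bool)) (i : Nat) (r' : List Bool) (hi : i < v.length)
    (h : r'.count false < (v[i]).count false) : pvFalse (v.set i r') < pvFalse v := by
  induction v generalizing i with
  | nil => simp at hi
  | cons a t ih =>
    cases i with
    | zero => simpa [pvFalse] using h
    | succ i =>
      simp only [List.set_cons_succ, pvFalse, List.map_cons, List.sum_cons]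
      have := ih i (by simpa using hi) (by simpa using h)
      simpa [pvFalse] using this

theorem pvVSet_false_lt (v : List (List Bool)) (x y : Int) (hx : 0 ≤ x) (hy : 0 ≤ y)
    (hf : pvVGet v x y = false) : pvFalse (pvVSet v x y) < pvFalse v := by
  unfold pvVGet at hf
  rw [PySem.List.pyGetD_of_nonneg v [] hx, PySem.List.pyGetD_of_nonneg _ true hy] at hf
  unfold pvVSet
  rw [PySem.List.pyGetD_of_nonneg v [] hx, PySem.List.pySetD_of_nonneg _ _ hy,
      PySem.List.pySetD_of_nonneg v _ hx]
  set row := v.getD x.toNat [] with hrow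
  have hylen : y.toNat < row.length := by
    by_contra hge
    rw [List.getD_eq_getElem?_getD, List.getElem?_eq_none (by omega)] at hf
    simp at hf
  have hxlen : x.toNat < v.length := by
    by_contra hge
    rw [hrow] at hylen
    rw [List.getD_eq_getElem?_getD, List.getElem?_eq_none (by omega)] at hylen
    simp at hylen
  have hrowv : row = v[x.toNat] := by
    rw [hrow, List.getD_eq_getElem?_getD, List.getElem?_eq_getElem hxlen]; rfl
  apply pvFalse_set_lt v x.toNat _ hxlen
  rw [← hrowv]
  apply count_false_set_lt
  rw [List.getD_eq_getElem?_getD, List.getElem?_eq_getElem hylen] at hf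
  exact hf

theorem is_valid_bounds (grid : List (List Int)) (r c : Int) (blocked_areas : List (Int × Int))
    (h : is_valid grid r c blocked_areas = true) : 0 ≤ r ∧ 0 ≤ c := by
  unfold is_valid at h
  split_ifs at h with h1 h2 h3
  simp only [Bool.or_eq_true, decide_eq_true_eq, not_or] at h1 h2
  omega

theorem pvBfsStep_measure (grid : List (List Int)) (blocked_areas : List (Int × Int))
    (x y : Int) (st : List (List Bool) × List (Int × Int)) (d : Int × Int) :
    2 * pvFalse (pvBfsStep grid blocked_areas x y st d).1
      + (pvBfsStep grid blocked_areas x y st d).2.length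
      ≤ 2 * pvFalse st.1 + st.2.length := by
  unfold pvBfsStep
  simp only []
  split_ifs with h1 h2
  · obtain ⟨hx, hy⟩ := is_valid_bounds grid (x + d.1) (y + d.2) blocked_areas h1
    simp only [Bool.and_eq_true, Bool.not_eq_true'] at h2
    have := pvVSet_false_lt st.1 (x + d.1) (y + d.2) hx hy h2.1
    simp only [List.length_append, List.length_cons, List.length_nil]
    omega
  · exact le_refl _
  · exact le_refl _

theorem pvBfsFold_measure (grid : List (List Int)) (blocked_areas : List (Int × Int))
    (x y : Int) (v : List (List Bool)) :
    2 * pvFalse (([((1:Int),(0:Int)), (-1,0), (0,1), (0,-1)].foldl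
          (pvBfsStep grid blocked_areas x y) (v, [])).1)
      + (([((1:Int),(0:Int)), (-1,0), (0,1), (0,-1)].foldl
          (pvBfsStep grid blocked_areas x y) (v, [])).2).length
      ≤ 2 * pvFalse v := by
  simp only [List.foldl_cons, List.foldl_nil]
  have h1 := pvBfsStep_measure grid blocked_areas x y (v, []) ((1:Int),(0:Int))
  have h2 := pvBfsStep_measure grid blocked_areas x y
    (pvBfsStep grid blocked_areas x y (v, []) ((1:Int),(0:Int))) ((-1:Int),(0:Int))
  have h3 := pvBfsStep_measure grid blocked_areas x y
    (pvBfsStep grid blocked_areas x y (pvBfsStep grid blocked_areas x y (v, []) ((1:Int),(0:Int))) ((-1:Int),(0:Int))) ((0:Int),(1:Int))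
  have h4 := pvBfsStep_measure grid blocked_areas x y
    (pvBfsStep grid blocked_areas x y (pvBfsStep grid blocked_areas x y (pvBfsStep grid blocked_areas x y (v, []) ((1:Int),(0:Int))) ((-1:Int),(0:Int))) ((0:Int),(1:Int))) ((0:Int),(-1:Int))
  simp only [List.length_nil] at h1
  omega

-- the BFS while-loop of A (queue, visited, size)
def pvBfs (grid : List (List Int)) (blocked_areas : List (Int × Int)) :
    List (Int × Int) → List (List Bool) → Int → List (List Bool) × Int
  | [], v, size => (v, size)
  | (x, y) :: rest, v, size =>
    let st := [((1:Int),(0:Int)), (-1,0), (0,1), (0,-1)].foldl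
        (pvBfsStep grid blocked_areas x y) (v, [])
    pvBfs grid blocked_areas (rest ++ st.2) st.1 (size + 1)
  termination_by q v _ => 2 * pvFalse v + q.length
  decreasing_by
    have h := pvBfsFold_measure grid blocked_areas x y v
    simp only [List.length_append, List.length_cons]
    omega

def find_contiguous_regions (grid : List (List Int)) (blocked_areas : List (Int × Int)) : List Int :=
  let rows : Int := (grid.length : Int)
  let visited0 : List (List Bool) := grid.map (fun row => List.replicate row.length false)
  let res := (PySem.List.pyRange 0 rows 1).foldl (fun (st : List (List Bool) × List Int) r =>
      (PySem.List.pyRange 0 ((pvRow grid r).length : Int) 1).foldl (fun st c =>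
        if !pvVGet st.1 r c && (pvCell grid r c == 0) && !blocked_areas.contains (r, c) then
          let bfs := pvBfs grid blocked_areas [(r, c)] (pvVSet st.1 r c) 0
          (bfs.1, st.2 ++ [bfs.2])
        else st) st) (visited0, [])
  res.2

-- ===== PORT B =====
-- _open(grid, r, c, blocked_areas) of Source B
def pvOpen (grid : List (List Int)) (r c : Int) (blocked_areas : List (Int × Int)) : Bool :=
  decide (0 ≤ r) && decide (r < (grid.length : Int)) &&
  decide (0 ≤ c) && decide (c < ((pvRow grid r).length : Int)) &&
  (pvCell grid r c == 0) && !blocked_areas.contains (r, c)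

-- one growth round: grown = set(comp) plus every open neighbor of a cell of comp
def pvGrow (grid : List (List Int)) (blocked_areas : List (Int × Int))
    (comp : PySem.Set (Int × Int)) : PySem.Set (Int × Int) :=
  comp.foldl (fun g p =>
    [(p.1 + 1, p.2), (p.1 - 1, p.2), (p.1, p.2 + 1), (p.1, p.2 - 1)].foldl (fun g q =>
      if pvOpen grid q.1 q.2 blocked_areas then PySem.Set.add g q else g) g)
    (PySem.Set.ofList comp)

-- the while-True loop of Source B, totalized with fuel (total cell count + 1, always sufficient)
def pvClosure (grid : List (List Int)) (blocked_areas : List (Int × Int)) :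
    Nat → PySem.Set (Int × Int) → PySem.Set (Int × Int)
  | 0, comp => comp
  | fuel + 1, comp =>
    let grown := pvGrow grid blocked_areas comp
    if grown.length = comp.length then comp
    else pvClosure grid blocked_areas fuel grown

def find_contiguous_regions_alt (grid : List (List Int)) (blocked_areas : List (Int × Int)) : List Int :=
  let res := (PySem.List.pyRange 0 (grid.length : Int) 1).foldl
      (fun (st : PySem.Set (Int × Int) × List Int) r =>
      (PySem.List.pyRange 0 ((pvRow grid r).length : Int) 1).foldl (fun st c =>
        if !PySem.Set.contains st.1 (r, c) && pvOpen grid r c blocked_areas then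
          let comp := pvClosure grid blocked_areas ((grid.map List.length).sum + 1)
              (PySem.Set.ofList [(r, c)])
          (PySem.Set.union st.1 comp, st.2 ++ [(comp.length : Int)])
        else st) st) (PySem.Set.empty, [])
  res.2

-- ===== PRECONDITION & SPEC =====
def Spec_find_contiguous_regions (grid : List (List Int)) (blocked_areas : List (Int × Int)) (out : List Int) : Prop := out = find_contiguous_regions_alt grid blocked_areas
instance (grid : List (List Int)) (blocked_areas : List (Int × Int)) (out : List Int) : Decidable (Spec_find_contiguous_regions grid blocked_areas out) := by unfold Spec_find_contiguous_regions; infer_instance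

-- ===== CLAIM (what is proved, stated in full; the proofs are below) =====
def Claim_equal_find_contiguous_regions : Prop := ∀ (grid : List (List Int)) (blocked_areas : List (Int × Int)), Dom_find_contiguous_regions grid blocked_areas → Spec_find_contiguous_regions grid blocked_areas (find_contiguous_regions grid blocked_areas)

-- ===== LEMMAS AND PROOFS =====

-- proof-side semantic layer
def pvInB (g : List (List Int)) (p : Int × Int) : Prop :=
  0 ≤ p.1 ∧ p.1 < (g.length : Int) ∧ 0 ≤ p.2 ∧ p.2 < ((pvRow g p.1).length : Int)

def pvNbrs (p : Int × Int) : List (Int × Int) :=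
  [(p.1 + 1, p.2), (p.1 - 1, p.2), (p.1, p.2 + 1), (p.1, p.2 - 1)]

def pvEdge (g : List (List Int)) (b : List (Int × Int)) (p q : Int × Int) : Prop :=
  q ∈ pvNbrs p ∧ pvOpen g q.1 q.2 b = true

def pvReach (g : List (List Int)) (b : List (Int × Int)) (s p : Int × Int) : Prop :=
  Relation.ReflTransGen (pvEdge g b) s p

def pvVRep (g : List (List Int)) (v : List (List Bool)) (S : Int × Int → Prop) : Prop :=
  v.map List.length = g.map List.length ∧
  ∀ p : Int × Int, pvInB g p → (pvVGet v p.1 p.2 = true ↔ S p)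

theorem pvOpen_iff (g : List (List Int)) (b : List (Int × Int)) (r c : Int) :
    pvOpen g r c b = true ↔ pvInB g (r, c) ∧ pvCell g r c = 0 ∧ b.contains (r, c) = false := by
  simp [pvOpen, pvInB, beq_iff_eq, and_assoc]

theorem is_valid_iff (g : List (List Int)) (b : List (Int × Int)) (r c : Int) :
    is_valid g r c b = true ↔ pvInB g (r, c) ∧ b.contains (r, c) = false := by
  unfold is_valid pvInB
  split_ifs with h1 h2 h3 <;>
    simp only [Bool.or_eq_true, decide_eq_true_eq, not_or, not_lt, not_le] at * <;>
    constructor <;> intro h <;> simp_all <;> omega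

theorem mem_pvNbrs_symm (p q : Int × Int) : p ∈ pvNbrs q → q ∈ pvNbrs p := by
  rcases p with ⟨a, b⟩; rcases q with ⟨x, y⟩
  simp only [pvNbrs, List.mem_cons, List.mem_singleton, Prod.mk.injEq, List.not_mem_nil, or_false]
  rintro (⟨h1, h2⟩ | ⟨h1, h2⟩ | ⟨h1, h2⟩ | ⟨h1, h2⟩) <;> omega
theorem pvVSet_shape (v : List (List Bool)) (x y : Int) (hx : 0 ≤ x) (hy : 0 ≤ y) :
    (pvVSet v x y).map List.length = v.map List.length := by
  unfold pvVSet
  rw [PySem.List.pySetD_of_nonneg v _ hx, PySem.List.pyGetD_of_nonneg v [] hx,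
      PySem.List.pySetD_of_nonneg _ _ hy]
  by_cases h : x.toNat < v.length
  · apply List.ext_getElem (by simp)
    intro i h1 h2
    simp only [List.getElem_map, List.getElem_set]
    split_ifs with he
    · subst he; simp [List.getD_eq_getElem?_getD, List.getElem?_eq_getElem h]
    · rfl
  · rw [List.set_eq_of_length_le (by omega)]

theorem pvRow_eq (g : List (List Int)) (x : Int) (hx : 0 ≤ x) :
    pvRow g x = g[x.toNat]?.getD [] := by
  unfold pvRow
  rw [PySem.List.pyGetD_of_nonneg g [] hx, List.getD_eq_getElem?_getD]

theorem pvShape_row_len (g : List (List Int)) (v : List (List Bool))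
    (hsh : v.map List.length = g.map List.length) (i : Nat) :
    (v[i]?.getD ([] : List Bool)).length = (g[i]?.getD ([] : List Int)).length := by
  have h := congrArg (fun l => l[i]?) hsh
  simp only [List.getElem?_map] at h
  cases hv : v[i]? with
  | none =>
    have hlen : v.length = g.length := by
      have := congrArg List.length hsh; simpa using this
    have : g[i]? = none := by
      rw [List.getElem?_eq_none_iff] at hv ⊢; omega
    simp [hv, this]
  | some rv =>
    rw [hv] at h
    cases hg : g[i]? with
    | none => rw [hg] at h; simp at h
    | some rg => rw [hg] at h; simp at h ⊢; exact h

theorem pvVGet_pvVSet (g : List (List Int)) (v : List (List Bool))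
    (hsh : v.map List.length = g.map List.length) (x y : Int) (hin : pvInB g (x, y))
    (p : Int × Int) (hp : pvInB g p) :
    pvVGet (pvVSet v x y) p.1 p.2 = if p = (x, y) then true else pvVGet v p.1 p.2 := by
  obtain ⟨hx0, hx1, hy0, hy1⟩ := hin
  obtain ⟨hp10, hp11, hp20, hp21⟩ := hp
  simp only at hx0 hx1 hy0 hy1 hp10 hp11 hp20 hp21
  have hlen : v.length = g.length := by
    have := congrArg List.length hsh; simpa using this
  have hxv : x.toNat < v.length := by omega
  have hpv : p.1.toNat < v.length := by omega
  unfold pvVGet pvVSet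
  rw [PySem.List.pyGetD_of_nonneg v [] hx0, PySem.List.pySetD_of_nonneg _ _ hy0,
      PySem.List.pySetD_of_nonneg v _ hx0,
      PySem.List.pyGetD_of_nonneg _ [] hp10, PySem.List.pyGetD_of_nonneg _ true hp20,
      PySem.List.pyGetD_of_nonneg v [] hp10, PySem.List.pyGetD_of_nonneg _ true hp20]
  simp only [List.getD_eq_getElem?_getD]
  by_cases hpx : p.1.toNat = x.toNat
  · have hpx' : p.1 = x := by omega
    rw [hpx, List.getElem?_set_self (by omega)]
    simp only [Option.getD_some]
    have hrowlen : y.toNat < (v[x.toNat]?.getD []).length := by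
      have := pvShape_row_len g v hsh x.toNat
      rw [← pvRow_eq g x hx0] at this
      omega
    by_cases hpy : p.2.toNat = y.toNat
    · have hpy' : p.2 = y := by omega
      have hpeq : p = (x, y) := Prod.ext_iff.mpr ⟨hpx', hpy'⟩
      rw [hpy, List.getElem?_set_self (by omega)]
      simp [hpeq]
    · have hpne : p ≠ (x, y) := by
        intro hc; rw [Prod.ext_iff] at hc; omega
      rw [List.getElem?_set_ne (by omega)]
      simp [hpne, hpx]
  · have hpne : p ≠ (x, y) := by
      intro hc; rw [Prod.ext_iff] at hc; omega
    rw [List.getElem?_set_ne (by omega)]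
    simp only [hpne, if_false]

theorem pvVGet_init (g : List (List Int)) (p : Int × Int) (hp : pvInB g p) :
    pvVGet (g.map (fun row => List.replicate row.length false)) p.1 p.2 = false := by
  obtain ⟨h10, h11, h20, h21⟩ := hp
  unfold pvVGet
  rw [PySem.List.pyGetD_of_nonneg _ [] h10, PySem.List.pyGetD_of_nonneg _ true h20]
  have h1 : p.1.toNat < g.length := by omega
  have h2 : p.2.toNat < g[p.1.toNat].length := by
    rw [pvRow_eq g p.1 h10, List.getElem?_eq_getElem h1] at h21
    simp only [Option.getD_some] at h21
    omega
  simp only [List.getD_eq_getElem?_getD, List.getElem?_map, List.getElem?_eq_getElem h1,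
    Option.map_some, Option.getD_some, List.getElem?_replicate]
  simp [h2]

theorem pvVInit_shape (g : List (List Int)) :
    (g.map (fun row => List.replicate row.length false)).map List.length = g.map List.length := by
  simp
theorem pvOpen_is_valid (g : List (List Int)) (b : List (Int × Int)) (r c : Int)
    (h : pvOpen g r c b = true) : is_valid g r c b = true := by
  rw [pvOpen_iff] at h
  rw [is_valid_iff]
  exact ⟨h.1, h.2.2⟩

theorem pvBfsFold_spec (g : List (List Int)) (b : List (Int × Int)) (x y : Int) :
    ∀ (ds : List (Int × Int)) (v : List (List Bool)) (acc : List (Int × Int)),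
    v.map List.length = g.map List.length →
    ∃ new : List (Int × Int),
      (ds.foldl (pvBfsStep g b x y) (v, acc)).2 = acc ++ new ∧
      (ds.foldl (pvBfsStep g b x y) (v, acc)).1.map List.length = g.map List.length ∧
      new.Nodup ∧
      (∀ p : Int × Int, pvInB g p →
        (pvVGet (ds.foldl (pvBfsStep g b x y) (v, acc)).1 p.1 p.2 = true ↔
          pvVGet v p.1 p.2 = true ∨ p ∈ new)) ∧
      (∀ n ∈ new, (∃ d ∈ ds, n = (x + d.1, y + d.2)) ∧ pvOpen g n.1 n.2 b = true ∧
        pvVGet v n.1 n.2 = false) ∧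
      (∀ d ∈ ds, pvOpen g (x + d.1) (y + d.2) b = true →
        pvVGet (ds.foldl (pvBfsStep g b x y) (v, acc)).1 (x + d.1) (y + d.2) = true) := by
  intro ds
  induction ds with
  | nil =>
    intro v acc hsh
    exact ⟨[], by simp, by simpa using hsh, by simp, by simp, by simp, by simp⟩
  | cons d ds ih =>
    intro v acc hsh
    simp only [List.foldl_cons]
    by_cases hv : is_valid g (x + d.1) (y + d.2) b = true
    · by_cases hfresh : (!pvVGet v (x + d.1) (y + d.2) && (pvCell g (x + d.1) (y + d.2) == 0)) = true
      · -- push case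
        have hstep : pvBfsStep g b x y (v, acc) d =
            (pvVSet v (x + d.1) (y + d.2), acc ++ [(x + d.1, y + d.2)]) := by
          unfold pvBfsStep
          simp [hv, hfresh]
        rw [hstep]
        have hinb : pvInB g (x + d.1, y + d.2) := ((is_valid_iff g b _ _).mp hv).1
        have hnbl : b.contains (x + d.1, y + d.2) = false := ((is_valid_iff g b _ _).mp hv).2
        simp only [Bool.and_eq_true, Bool.not_eq_true', beq_iff_eq] at hfresh
        have hopen : pvOpen g (x + d.1) (y + d.2) b = true :=
          (pvOpen_iff g b _ _).mpr ⟨hinb, hfresh.2, hnbl⟩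
        have hsh1 : (pvVSet v (x + d.1) (y + d.2)).map List.length = g.map List.length := by
          rw [pvVSet_shape v _ _ hinb.1 hinb.2.2.1]; exact hsh
        obtain ⟨new, h1, h2, h3, h4, h5, h6⟩ := ih (pvVSet v (x + d.1) (y + d.2)) (acc ++ [(x + d.1, y + d.2)]) hsh1
        have hget : ∀ p : Int × Int, pvInB g p →
            pvVGet (pvVSet v (x + d.1) (y + d.2)) p.1 p.2 =
              if p = (x + d.1, y + d.2) then true else pvVGet v p.1 p.2 :=
          fun p hp => pvVGet_pvVSet g v hsh (x + d.1) (y + d.2) hinb p hp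
        refine ⟨(x + d.1, y + d.2) :: new, ?_, h2, ?_, ?_, ?_, ?_⟩
        · rw [h1]; simp
        · refine List.nodup_cons.mpr ⟨?_, h3⟩
          intro hmem
          have hgf := (h5 _ hmem).2.2
          rw [hget _ hinb] at hgf
          simp at hgf
        · intro p hp
          rw [h4 p hp, hget p hp]
          by_cases hpe : p = (x + d.1, y + d.2) <;> simp [hpe]
        · intro n hn
          rcases List.mem_cons.mp hn with hn1 | hn1
          · subst hn1
            refine ⟨⟨d, by simp, rfl⟩, hopen, hfresh.1⟩
          · obtain ⟨⟨dd, hdd, hndd⟩, hop, hg⟩ := h5 n hn1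
            have hinn : pvInB g n := ((pvOpen_iff g b _ _).mp hop).1
            rw [hget n hinn] at hg
            refine ⟨⟨dd, by simp [hdd], hndd⟩, hop, ?_⟩
            by_cases hne : n = (x + d.1, y + d.2)
            · rw [hne] at hg; simp at hg
            · simpa [hne] using hg
        · intro dd hdd hop2
          rcases List.mem_cons.mp hdd with hdd1 | hdd1
          · subst hdd1
            have hinn : pvInB g (x + dd.1, y + dd.2) := ((pvOpen_iff g b _ _).mp hop2).1
            rw [h4 _ hinn, hget _ hinn]
            simp
          · exact h6 dd hdd1 hop2
      · -- valid but already visited or nonzero cell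
        have hstep : pvBfsStep g b x y (v, acc) d = (v, acc) := by
          unfold pvBfsStep
          simp [hv, hfresh]
        rw [hstep]
        obtain ⟨new, h1, h2, h3, h4, h5, h6⟩ := ih v acc hsh
        refine ⟨new, h1, h2, h3, h4, ?_, ?_⟩
        · intro n hn
          obtain ⟨⟨dd, hdd, hndd⟩, hop, hg⟩ := h5 n hn
          exact ⟨⟨dd, by simp [hdd], hndd⟩, hop, hg⟩
        · intro dd hdd hop2
          rcases List.mem_cons.mp hdd with hdd1 | hdd1
          · subst hdd1
            simp only [Bool.and_eq_true, Bool.not_eq_true', beq_iff_eq, not_and] at hfresh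
            have hcell : pvCell g (x + dd.1) (y + dd.2) = 0 := ((pvOpen_iff g b _ _).mp hop2).2.1
            have hinn : pvInB g (x + dd.1, y + dd.2) := ((pvOpen_iff g b _ _).mp hop2).1
            have hgv : pvVGet v (x + dd.1) (y + dd.2) = true := by
              cases hc : pvVGet v (x + dd.1) (y + dd.2) with
              | false => exact absurd hcell (hfresh hc)
              | true => rfl
            rw [h4 _ hinn]
            exact Or.inl hgv
          · exact h6 dd hdd1 hop2
    · -- invalid neighbor
      have hstep : pvBfsStep g b x y (v, acc) d = (v, acc) := by
        unfold pvBfsStep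
        simp [hv]
      rw [hstep]
      obtain ⟨new, h1, h2, h3, h4, h5, h6⟩ := ih v acc hsh
      refine ⟨new, h1, h2, h3, h4, ?_, ?_⟩
      · intro n hn
        obtain ⟨⟨dd, hdd, hndd⟩, hop, hg⟩ := h5 n hn
        exact ⟨⟨dd, by simp [hdd], hndd⟩, hop, hg⟩
      · intro dd hdd hop2
        rcases List.mem_cons.mp hdd with hdd1 | hdd1
        · subst hdd1
          exact absurd (pvOpen_is_valid g b _ _ hop2) hv
        · exact h6 dd hdd1 hop2
theorem pvDirs_mem_nbrs (x y : Int) (d : Int × Int)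
    (hd : d ∈ [((1:Int),(0:Int)), (-1,0), (0,1), (0,-1)]) :
    (x + d.1, y + d.2) ∈ pvNbrs (x, y) := by
  rcases List.mem_cons.mp hd with h | h
  · subst h; simp [pvNbrs, sub_eq_add_neg]
  rcases List.mem_cons.mp h with h | h
  · subst h; simp [pvNbrs, sub_eq_add_neg]
  rcases List.mem_cons.mp h with h | h
  · subst h; simp [pvNbrs, sub_eq_add_neg]
  rcases List.mem_cons.mp h with h | h
  · subst h; simp [pvNbrs, sub_eq_add_neg]
  · simp at h

theorem pvNbrs_mem_dirs (x y : Int) (n : Int × Int) (hn : n ∈ pvNbrs (x, y)) :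
    ∃ d ∈ [((1:Int),(0:Int)), (-1,0), (0,1), (0,-1)], n = (x + d.1, y + d.2) := by
  simp only [pvNbrs, List.mem_cons, List.not_mem_nil, or_false] at hn
  rcases hn with h | h | h | h
  · exact ⟨(1, 0), by simp, by simp [h]⟩
  · exact ⟨(-1, 0), by simp, by simp [h, sub_eq_add_neg]⟩
  · exact ⟨(0, 1), by simp, by simp [h]⟩
  · exact ⟨(0, -1), by simp, by simp [h, sub_eq_add_neg]⟩

theorem pvBfs_spec (g : List (List Int)) (b : List (Int × Int)) (V : Int × Int → Prop)
    (s0 : Int × Int) :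
    ∀ (qu : List (Int × Int)) (v : List (List Bool)) (size : Int) (M : List (Int × Int)),
    pvVRep g v (fun p => V p ∨ p ∈ M) →
    M.Nodup →
    (∀ p ∈ M, pvOpen g p.1 p.2 b = true ∧ pvReach g b s0 p ∧ ¬ V p) →
    s0 ∈ M →
    qu.Nodup → (∀ p ∈ qu, p ∈ M) →
    (∀ p ∈ M, p ∉ qu → ∀ n, pvEdge g b p n → V n ∨ n ∈ M) →
    size + qu.length = (M.length : Int) →
    ∃ M' : List (Int × Int), (pvBfs g b qu v size).2 = (M'.length : Int) ∧ M'.Nodup ∧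
      (∀ p ∈ M', pvOpen g p.1 p.2 b = true ∧ pvReach g b s0 p ∧ ¬ V p) ∧ s0 ∈ M' ∧
      (∀ p ∈ M', ∀ n, pvEdge g b p n → V n ∨ n ∈ M') ∧
      pvVRep g (pvBfs g b qu v size).1 (fun p => V p ∨ p ∈ M') := by
  intro qu v size
  induction qu, v, size using pvBfs.induct g b with
  | case1 v size =>
    intro M hrep hMnd hMok hs0 hqnd hqM hcl hcount
    refine ⟨M, ?_, hMnd, hMok, hs0, ?_, ?_⟩
    · simp only [pvBfs]
      simpa using hcount
    · intro p hp n he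
      exact hcl p hp (by simp) n he
    · simpa only [pvBfs] using hrep
  | case2 x y rest v size st ih =>
    intro M hrep hMnd hMok hs0 hqnd hqM hcl hcount
    have hst : st = List.foldl (pvBfsStep g b x y) (v, []) [((1:Int),(0:Int)), (-1,0), (0,1), (0,-1)] := rfl
    obtain ⟨new, h1, h2, h3, h4, h5, h6⟩ :=
      pvBfsFold_spec g b x y [((1:Int),(0:Int)), (-1,0), (0,1), (0,-1)] v [] hrep.1
    have hst2 : st.2 = new := by rw [hst, h1]; simp
    have hxyM : (x, y) ∈ M := hqM _ (by simp)
    have hnew_inb : ∀ n ∈ new, pvInB g n := by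
      intro n hn
      exact ((pvOpen_iff g b _ _).mp (h5 n hn).2.1).1
    have hnew_notM : ∀ n ∈ new, ¬ (V n ∨ n ∈ M) := by
      intro n hn hVn
      have hgt := (hrep.2 n (hnew_inb n hn)).mpr hVn
      rw [(h5 n hn).2.2] at hgt
      exact Bool.false_ne_true hgt
    have hM1 := ih (M ++ new) ?_ ?_ ?_ ?_ ?_ ?_ ?_ ?_
    · obtain ⟨M', hA, hB, hC, hD, hE, hF⟩ := hM1
      refine ⟨M', ?_, hB, hC, hD, hE, ?_⟩
      · simp only [pvBfs]
        rw [← hst]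
        exact hA
      · simp only [pvBfs]
        rw [← hst]
        exact hF
    · constructor
      · rw [hst]; exact h2
      · intro p hp
        rw [hst]
        rw [h4 p hp, hrep.2 p hp]
        simp only [List.mem_append]
        tauto
    · refine List.Nodup.append hMnd h3 ?_
      intro a ha han
      exact hnew_notM a han (Or.inr ha)
    · intro p hp
      rcases List.mem_append.mp hp with hp1 | hp1
      · exact hMok p hp1
      · obtain ⟨⟨d, hd, hnd⟩, hop, hg⟩ := h5 p hp1
        have hedge : pvEdge g b (x, y) p := by
          refine ⟨?_, hop⟩
          rw [hnd]; exact pvDirs_mem_nbrs x y d hd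
        refine ⟨hop, ?_, ?_⟩
        · exact Relation.ReflTransGen.tail (hMok _ hxyM).2.1 hedge
        · intro hV
          exact hnew_notM p hp1 (Or.inl hV)
    · exact List.mem_append.mpr (Or.inl hs0)
    · rw [hst2]
      refine List.Nodup.append (List.nodup_cons.mp hqnd).2 h3 ?_
      intro a ha han
      exact hnew_notM a han (Or.inr (hqM a (by simp [ha])))
    · intro p hp
      rw [hst2] at hp
      rcases List.mem_append.mp hp with hp1 | hp1
      · exact List.mem_append.mpr (Or.inl (hqM p (by simp [hp1])))
      · exact List.mem_append.mpr (Or.inr hp1)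
    · intro p hp hpq n hedge
      rw [hst2] at hpq
      rcases List.mem_append.mp hp with hp1 | hp1
      · by_cases hpxy : p = (x, y)
        · subst hpxy
          obtain ⟨hnb, hop⟩ := hedge
          obtain ⟨d, hd, hnd⟩ := pvNbrs_mem_dirs x y n hnb
          subst hnd
          have hginb : pvInB g (x + d.1, y + d.2) := ((pvOpen_iff g b _ _).mp hop).1
          have hcov := h6 d hd hop
          rw [h4 _ hginb] at hcov
          rcases hcov with hv1 | hv1
          · rcases (hrep.2 _ hginb).mp hv1 with h | h
            · exact Or.inl h
            · exact Or.inr (List.mem_append.mpr (Or.inl h))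
          · exact Or.inr (List.mem_append.mpr (Or.inr hv1))
        · have hpnrest : p ∉ (x, y) :: rest := by
            simp only [List.mem_cons, not_or]
            exact ⟨hpxy, fun hc => hpq (List.mem_append.mpr (Or.inl hc))⟩
          rcases hcl p hp1 hpnrest n hedge with h | h
          · exact Or.inl h
          · exact Or.inr (List.mem_append.mpr (Or.inl h))
      · exact absurd (List.mem_append.mpr (Or.inr hp1)) hpq
    · rw [hst2]
      simp only [List.length_append, List.length_cons] at hcount ⊢
      push_cast at hcount ⊢
      omega
theorem pvMem_foldl_add_if (c : Int × Int → Bool) :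
    ∀ (l : List (Int × Int)) (s : PySem.Set (Int × Int)) (z : Int × Int),
    z ∈ l.foldl (fun s q => if c q then PySem.Set.add s q else s) s ↔
      z ∈ s ∨ (z ∈ l ∧ c z = true) := by
  intro l
  induction l with
  | nil => simp
  | cons q l ih =>
    intro s z
    simp only [List.foldl_cons]
    by_cases hq : c q = true
    · rw [if_pos hq, ih, PySem.Set.mem_add]
      constructor
      · rintro (⟨h | h⟩ | h)
        · exact Or.inl h
        · subst h; exact Or.inr ⟨by simp, hq⟩
        · exact Or.inr ⟨by simp [h.1], h.2⟩
      · rintro (h | ⟨h1, h2⟩)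
        · exact Or.inl (Or.inl h)
        · rcases List.mem_cons.mp h1 with h3 | h3
          · exact Or.inl (Or.inr h3)
          · exact Or.inr ⟨h3, h2⟩
    · rw [if_neg hq, ih]
      constructor
      · rintro (h | h)
        · exact Or.inl h
        · exact Or.inr ⟨by simp [h.1], h.2⟩
      · rintro (h | ⟨h1, h2⟩)
        · exact Or.inl h
        · rcases List.mem_cons.mp h1 with h3 | h3
          · subst h3; exact absurd h2 hq
          · exact Or.inr ⟨h3, h2⟩

theorem pvNodup_foldl_add_if (c : Int × Int → Bool) :
    ∀ (l : List (Int × Int)) (s : PySem.Set (Int × Int)), s.Nodup →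
    (l.foldl (fun s q => if c q then PySem.Set.add s q else s) s).Nodup := by
  intro l
  induction l with
  | nil => intro s hs; simpa using hs
  | cons q l ih =>
    intro s hs
    simp only [List.foldl_cons]
    by_cases hq : c q = true
    · rw [if_pos hq]; exact ih _ (PySem.Set.nodup_add s q hs)
    · rw [if_neg hq]; exact ih _ hs

theorem pvPrefix_foldl_add_if (c : Int × Int → Bool) :
    ∀ (l : List (Int × Int)) (s : PySem.Set (Int × Int)),
    s <+: l.foldl (fun s q => if c q then PySem.Set.add s q else s) s := by
  intro l
  induction l with
  | nil => intro s; simp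
  | cons q l ih =>
    intro s
    simp only [List.foldl_cons]
    by_cases hq : c q = true
    · rw [if_pos hq]
      refine List.IsPrefix.trans ?_ (ih _)
      rw [PySem.Set.add_eq_ite]
      split_ifs
      · exact List.prefix_refl s
      · exact ⟨[q], rfl⟩
    · rw [if_neg hq]; exact ih s
theorem pvGrowAux_mem (g : List (List Int)) (b : List (Int × Int)) :
    ∀ (l : List (Int × Int)) (s : PySem.Set (Int × Int)) (z : Int × Int),
    z ∈ l.foldl (fun acc p =>
        [(p.1 + 1, p.2), (p.1 - 1, p.2), (p.1, p.2 + 1), (p.1, p.2 - 1)].foldl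
          (fun acc q => if pvOpen g q.1 q.2 b then PySem.Set.add acc q else acc) acc) s ↔
      z ∈ s ∨ ∃ p ∈ l, z ∈ pvNbrs p ∧ pvOpen g z.1 z.2 b = true := by
  intro l
  induction l with
  | nil => simp
  | cons p l ih =>
    intro s z
    rw [List.foldl_cons]
    rw [ih]
    rw [show ([(p.1 + 1, p.2), (p.1 - 1, p.2), (p.1, p.2 + 1), (p.1, p.2 - 1)] : List (Int × Int)) = pvNbrs p from rfl]
    rw [pvMem_foldl_add_if (fun q => pvOpen g q.1 q.2 b) (pvNbrs p) s z]
    constructor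
    · rintro (⟨h | ⟨h1, h2⟩⟩ | ⟨q, hq, h1, h2⟩)
      · exact Or.inl h
      · exact Or.inr ⟨p, by simp, h1, h2⟩
      · exact Or.inr ⟨q, by simp [hq], h1, h2⟩
    · rintro (h | ⟨q, hq, h1, h2⟩)
      · exact Or.inl (Or.inl h)
      · rcases List.mem_cons.mp hq with h3 | h3
        · subst h3; exact Or.inl (Or.inr ⟨h1, h2⟩)
        · exact Or.inr ⟨q, h3, h1, h2⟩

theorem pvGrowAux_nodup (g : List (List Int)) (b : List (Int × Int)) :
    ∀ (l : List (Int × Int)) (s : PySem.Set (Int × Int)), s.Nodup →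
    (l.foldl (fun acc p =>
        [(p.1 + 1, p.2), (p.1 - 1, p.2), (p.1, p.2 + 1), (p.1, p.2 - 1)].foldl
          (fun acc q => if pvOpen g q.1 q.2 b then PySem.Set.add acc q else acc) acc) s).Nodup := by
  intro l
  induction l with
  | nil => intro s hs; simpa using hs
  | cons p l ih =>
    intro s hs
    rw [List.foldl_cons]
    exact ih _ (pvNodup_foldl_add_if _ _ s hs)

theorem pvGrowAux_prefix (g : List (List Int)) (b : List (Int × Int)) :
    ∀ (l : List (Int × Int)) (s : PySem.Set (Int × Int)),
    s <+: l.foldl (fun acc p =>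
        [(p.1 + 1, p.2), (p.1 - 1, p.2), (p.1, p.2 + 1), (p.1, p.2 - 1)].foldl
          (fun acc q => if pvOpen g q.1 q.2 b then PySem.Set.add acc q else acc) acc) s := by
  intro l
  induction l with
  | nil => intro s; simp
  | cons p l ih =>
    intro s
    rw [List.foldl_cons]
    exact List.IsPrefix.trans (pvPrefix_foldl_add_if _ _ s) (ih _)

theorem pvGrow_mem (g : List (List Int)) (b : List (Int × Int)) (comp : PySem.Set (Int × Int))
    (hn : comp.Nodup) (z : Int × Int) :
    z ∈ pvGrow g b comp ↔ z ∈ comp ∨ ∃ p ∈ comp, pvEdge g b p z := by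
  unfold pvGrow
  rw [PySem.Set.ofList_eq_self_of_nodup comp hn] at *
  rw [pvGrowAux_mem g b comp comp z]
  unfold pvEdge
  tauto

theorem pvGrow_nodup (g : List (List Int)) (b : List (Int × Int)) (comp : PySem.Set (Int × Int)) :
    (pvGrow g b comp).Nodup := by
  unfold pvGrow
  exact pvGrowAux_nodup g b comp _ (PySem.Set.nodup_ofList comp)

theorem pvGrow_prefix (g : List (List Int)) (b : List (Int × Int)) (comp : PySem.Set (Int × Int))
    (hn : comp.Nodup) : comp <+: pvGrow g b comp := by
  unfold pvGrow
  rw [PySem.Set.ofList_eq_self_of_nodup comp hn]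
  exact pvGrowAux_prefix g b comp comp
def pvAllCells (g : List (List Int)) : List (Int × Int) :=
  (PySem.List.pyRange 0 (g.length : Int) 1).flatMap
    (fun r => (PySem.List.pyRange 0 ((pvRow g r).length : Int) 1).map (fun c => (r, c)))

theorem pvMem_allCells (g : List (List Int)) (p : Int × Int) (hp : pvInB g p) :
    p ∈ pvAllCells g := by
  obtain ⟨h10, h11, h20, h21⟩ := hp
  unfold pvAllCells
  rw [List.mem_flatMap]
  refine ⟨p.1, ?_, ?_⟩
  · rw [PySem.List.mem_pyRange_one]; exact ⟨h10, h11⟩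
  · rw [List.mem_map]
    refine ⟨p.2, ?_, ?_⟩
    · rw [PySem.List.mem_pyRange_one]; exact ⟨h20, h21⟩
    · rfl

theorem pvAllCells_length (g : List (List Int)) :
    (pvAllCells g).length = (g.map List.length).sum := by
  unfold pvAllCells
  rw [List.length_flatMap]
  have h1 : ∀ r : Int, ((PySem.List.pyRange 0 ((pvRow g r).length : Int) 1).map
      (fun c => (r, c))).length = (pvRow g r).length := by
    intro r
    rw [List.length_map, PySem.List.length_pyRange_one]
    omega
  rw [List.map_congr_left (fun r _ => h1 r)]
  have h2 : (PySem.List.pyRange 0 (g.length : Int) 1).map (fun r => (pvRow g r).length) =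
      ((PySem.List.pyRange 0 (g.length : Int) 1).map (fun r => PySem.List.pyGetD g r [])).map
        List.length := by
    rw [List.map_map]; rfl
  rw [h2, PySem.List.map_pyGetD_pyRange_zero']

theorem pvNodup_inb_length_le (g : List (List Int)) (l : List (Int × Int)) (hn : l.Nodup)
    (hin : ∀ p ∈ l, pvInB g p) : l.length ≤ (g.map List.length).sum := by
  rw [← pvAllCells_length g]
  exact (List.subperm_of_subset hn (fun p hp => pvMem_allCells g p (hin p hp))).length_le

theorem pvReach_tail (g : List (List Int)) (b : List (Int × Int)) (s0 p n : Int × Int)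
    (h : pvReach g b s0 p) (e : pvEdge g b p n) : pvReach g b s0 n :=
  Relation.ReflTransGen.tail h e

theorem pvReach_props (g : List (List Int)) (b : List (Int × Int)) (V : Int × Int → Prop)
    (hVcl : ∀ p q, V p → pvEdge g b p q → V q) (s0 : Int × Int)
    (hs0V : ¬ V s0) (hs0op : pvOpen g s0.1 s0.2 b = true) :
    ∀ p, pvReach g b s0 p → ¬ V p ∧ pvOpen g p.1 p.2 b = true := by
  intro p h
  induction h with
  | refl => exact ⟨hs0V, hs0op⟩
  | tail hr e ih =>
    rename_i q n
    refine ⟨?_, e.2⟩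
    intro hVn
    have hback : pvEdge g b n q := ⟨mem_pvNbrs_symm n q e.1, ih.2⟩
    exact ih.1 (hVcl n q hVn hback)

theorem pvClosure_spec (g : List (List Int)) (b : List (Int × Int)) (s0 : Int × Int) :
    ∀ (fuel : Nat) (comp : PySem.Set (Int × Int)), comp.Nodup →
    (∀ p ∈ comp, pvOpen g p.1 p.2 b = true ∧ pvReach g b s0 p) → s0 ∈ comp →
    (g.map List.length).sum + 1 ≤ fuel + comp.length →
    (pvClosure g b fuel comp).Nodup ∧
    (∀ z, z ∈ pvClosure g b fuel comp ↔ pvReach g b s0 z) := by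
  intro fuel
  induction fuel with
  | zero =>
    intro comp hnd hprops hs0 hbound
    have hle : comp.length ≤ (g.map List.length).sum := by
      apply pvNodup_inb_length_le g comp hnd
      intro p hp
      exact ((pvOpen_iff g b _ _).mp (hprops p hp).1).1
    omega
  | succ fuel ih =>
    intro comp hnd hprops hs0 hbound
    by_cases heq : (pvGrow g b comp).length = comp.length
    · have hfix : pvGrow g b comp = comp :=
        ((pvGrow_prefix g b comp hnd).eq_of_length heq.symm).symm
      have hres : pvClosure g b (fuel + 1) comp = comp := by
        simp [pvClosure, heq]
      rw [hres]
      refine ⟨hnd, ?_⟩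
      intro z
      constructor
      · intro hz; exact (hprops z hz).2
      · intro hz
        induction hz with
        | refl => exact hs0
        | tail hr e ihz =>
          rename_i q n
          have : n ∈ pvGrow g b comp := by
            rw [pvGrow_mem g b comp hnd]
            exact Or.inr ⟨q, ihz, e⟩
          rwa [hfix] at this
    · have hres : pvClosure g b (fuel + 1) comp = pvClosure g b fuel (pvGrow g b comp) := by
        simp [pvClosure, heq]
      rw [hres]
      have hpre := pvGrow_prefix g b comp hnd
      have hlt : comp.length < (pvGrow g b comp).length :=
        lt_of_le_of_ne hpre.length_le (fun hc => heq hc.symm)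
      apply ih (pvGrow g b comp) (pvGrow_nodup g b comp)
      · intro p hp
        rw [pvGrow_mem g b comp hnd] at hp
        rcases hp with hp | ⟨q, hq, he⟩
        · exact hprops p hp
        · exact ⟨he.2, pvReach_tail g b s0 q p (hprops q hq).2 he⟩
      · exact hpre.mem hs0
      · omega
def pvRel (g : List (List Int)) (b : List (Int × Int))
    (stA : List (List Bool) × List Int) (stB : PySem.Set (Int × Int) × List Int) : Prop :=
  pvVRep g stA.1 (fun p => p ∈ stB.1) ∧ stA.2 = stB.2 ∧ stB.1.Nodup ∧
  (∀ p ∈ stB.1, pvOpen g p.1 p.2 b = true) ∧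
  (∀ p q, p ∈ stB.1 → pvEdge g b p q → q ∈ stB.1)

theorem pvFoldl_rel {α β γ : Type} (R : β → γ → Prop) :
    ∀ (l : List α) (f : β → α → β) (g : γ → α → γ),
    (∀ s t x, x ∈ l → R s t → R (f s x) (g t x)) →
    ∀ s t, R s t → R (l.foldl f s) (l.foldl g t) := by
  intro l
  induction l with
  | nil => intro f g _ s t h; simpa using h
  | cons x l ih =>
    intro f g hstep s t h
    simp only [List.foldl_cons]
    exact ih f g (fun s t z hz hR => hstep s t z (by simp [hz]) hR) _ _
      (hstep s t x (by simp) h)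

theorem pvCellStep (g : List (List Int)) (b : List (Int × Int)) (r c : Int)
    (hin : pvInB g (r, c)) (stA : List (List Bool) × List Int)
    (stB : PySem.Set (Int × Int) × List Int) (h : pvRel g b stA stB) :
    pvRel g b
      (if !pvVGet stA.1 r c && (pvCell g r c == 0) && !b.contains (r, c) then
        let bfs := pvBfs g b [(r, c)] (pvVSet stA.1 r c) 0
        (bfs.1, stA.2 ++ [bfs.2])
      else stA)
      (if !PySem.Set.contains stB.1 (r, c) && pvOpen g r c b then
        let comp := pvClosure g b ((g.map List.length).sum + 1) (PySem.Set.ofList [(r, c)])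
        (PySem.Set.union stB.1 comp, stB.2 ++ [(comp.length : Int)])
      else stB) := by
  obtain ⟨⟨hsh, hmem⟩, hregs, hnd, hopenB, hclB⟩ := h
  have hcond : (!pvVGet stA.1 r c && (pvCell g r c == 0) && !b.contains (r, c)) =
      (!PySem.Set.contains stB.1 (r, c) && pvOpen g r c b) := by
    rw [Bool.eq_iff_iff]
    simp only [Bool.and_eq_true, Bool.not_eq_true', beq_iff_eq]
    rw [pvOpen_iff]
    constructor
    · rintro ⟨⟨hg, hc⟩, hb⟩
      refine ⟨?_, hin, hc, hb⟩
      rw [← Bool.not_eq_true]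
      intro hcon
      rw [PySem.Set.contains_iff] at hcon
      have := (hmem (r, c) hin).mpr hcon
      rw [hg] at this
      exact Bool.false_ne_true this
    · rintro ⟨hnc, _, hc, hb⟩
      refine ⟨⟨?_, hc⟩, hb⟩
      rw [← Bool.not_eq_true (PySem.Set.contains stB.1 (r, c)), PySem.Set.contains_iff] at hnc
      cases hg : pvVGet stA.1 r c with
      | false => rfl
      | true => exact absurd ((hmem (r, c) hin).mp hg) hnc
  rw [hcond]
  by_cases hc : (!PySem.Set.contains stB.1 (r, c) && pvOpen g r c b) = true
  · rw [if_pos hc, if_pos hc]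
    simp only [Bool.and_eq_true, Bool.not_eq_true'] at hc
    have hnotin : (r, c) ∉ stB.1 := by
      rw [← Bool.not_eq_true (PySem.Set.contains stB.1 (r, c)), PySem.Set.contains_iff] at hc
      exact hc.1
    have hopen : pvOpen g r c b = true := hc.2
    -- A side: BFS produces a nodup list M' whose members are exactly the reachable cells
    have hrep1 : pvVRep g (pvVSet stA.1 r c) (fun p => p ∈ stB.1 ∨ p ∈ [(r, c)]) := by
      refine ⟨by rw [pvVSet_shape stA.1 r c hin.1 hin.2.2.1]; exact hsh, ?_⟩
      intro p hp
      rw [pvVGet_pvVSet g stA.1 hsh r c hin p hp]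
      by_cases hpe : p = (r, c)
      · simp [hpe]
      · simp only [hpe, if_false, List.mem_singleton, hpe, or_false]
        exact hmem p hp
    have hM0 : ∀ p ∈ [(r, c)], pvOpen g p.1 p.2 b = true ∧ pvReach g b (r, c) p ∧
        ¬ p ∈ stB.1 := by
      intro p hp
      rw [List.mem_singleton] at hp
      subst hp
      exact ⟨hopen, Relation.ReflTransGen.refl, hnotin⟩
    obtain ⟨M', hA, hB, hC, hD, hE, hF⟩ :=
      pvBfs_spec g b (fun p => p ∈ stB.1) (r, c) [(r, c)] (pvVSet stA.1 r c) 0 [(r, c)]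
        hrep1 (by simp) hM0 (by simp) (by simp) (by simp) (by simp) (by simp)
    have hofl : PySem.Set.ofList [((r : Int), (c : Int))] = [(r, c)] :=
      PySem.Set.ofList_eq_self_of_nodup _ (by simp)
    have hC0 : ∀ p ∈ PySem.Set.ofList [((r : Int), (c : Int))],
        pvOpen g p.1 p.2 b = true ∧ pvReach g b (r, c) p := by
      rw [hofl]
      intro p hp
      rw [List.mem_singleton] at hp
      subst hp
      exact ⟨hopen, Relation.ReflTransGen.refl⟩
    obtain ⟨hN, hMem⟩ := pvClosure_spec g b (r, c) ((g.map List.length).sum + 1)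
      (PySem.Set.ofList [(r, c)]) (by rw [hofl]; simp) hC0 (by rw [hofl]; simp)
      (by rw [hofl]; simp)
    -- members of M' are exactly the reachable cells
    have hreach_out : ∀ z, pvReach g b (r, c) z → z ∉ stB.1 := by
      intro z hz
      exact (pvReach_props g b (fun p => p ∈ stB.1) (fun p q hp he => hclB p q hp he)
        (r, c) hnotin hopen z hz).1
    have hMiff : ∀ z, z ∈ M' ↔ pvReach g b (r, c) z := by
      intro z
      constructor
      · intro hz; exact (hC z hz).2.1
      · intro hz
        have : z ∈ stB.1 ∨ z ∈ M' := by
          induction hz with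
          | refl => exact Or.inr hD
          | tail hr e ihz =>
            rename_i q n
            rcases ihz with hq | hq
            · exact Or.inl (hclB q n hq e)
            · exact hE q hq n e
        rcases this with hz1 | hz1
        · exact absurd hz1 (hreach_out z hz)
        · exact hz1
    have hperm : M'.Perm (pvClosure g b ((g.map List.length).sum + 1)
        (PySem.Set.ofList [(r, c)])) := by
      rw [List.perm_ext_iff_of_nodup hB hN]
      intro z
      rw [hMiff z, hMem z]
    have hlen : (M'.length : Int) =
        ((pvClosure g b ((g.map List.length).sum + 1)
          (PySem.Set.ofList [(r, c)])).length : Int) := by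
      rw [hperm.length_eq]
    constructor
    · -- representation
      refine ⟨hF.1, ?_⟩
      intro p hp
      rw [hF.2 p hp]
      simp only [PySem.Set.mem_union]
      rw [hMem p, ← hMiff p]
    refine ⟨?_, ?_, ?_, ?_⟩
    · simp only [hregs, hA, hlen]
    · exact PySem.Set.nodup_union stB.1 _ hnd
    · intro p hp
      rcases (PySem.Set.mem_union _ _ _).mp hp with hp1 | hp1
      · exact hopenB p hp1
      · rw [hMem p] at hp1
        exact (pvReach_props g b (fun q => q ∈ stB.1) (fun p q hp he => hclB p q hp he)
          (r, c) hnotin hopen p hp1).2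
    · intro p q hp he
      rcases (PySem.Set.mem_union _ _ _).mp hp with hp1 | hp1
      · exact (PySem.Set.mem_union _ _ _).mpr (Or.inl (hclB p q hp1 he))
      · rw [hMem p] at hp1
        refine (PySem.Set.mem_union _ _ _).mpr (Or.inr ?_)
        rw [hMem q]
        exact pvReach_tail g b (r, c) p q hp1 he
  · rw [if_neg hc, if_neg hc]
    exact ⟨⟨hsh, hmem⟩, hregs, hnd, hopenB, hclB⟩
theorem pvInit_rel (g : List (List Int)) (b : List (Int × Int)) :
    pvRel g b (g.map (fun row => List.replicate row.length false), ([] : List Int))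
      ((PySem.Set.empty : PySem.Set (Int × Int)), ([] : List Int)) := by
  refine ⟨⟨pvVInit_shape g, ?_⟩, rfl, by simp [PySem.Set.empty], ?_, ?_⟩
  · intro p hp
    rw [pvVGet_init g p hp]
    simp [PySem.Set.empty]
  · intro p hp
    simp [PySem.Set.empty] at hp
  · intro p q hp
    simp [PySem.Set.empty] at hp

theorem find_contiguous_regions_spec' (grid : List (List Int)) (blocked_areas : List (Int × Int)) :
    find_contiguous_regions grid blocked_areas = find_contiguous_regions_alt grid blocked_areas := by
  unfold find_contiguous_regions find_contiguous_regions_alt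
  simp only []
  have h := pvFoldl_rel (pvRel grid blocked_areas)
    (PySem.List.pyRange 0 (grid.length : Int) 1)
    (fun (st : List (List Bool) × List Int) r =>
      (PySem.List.pyRange 0 ((pvRow grid r).length : Int) 1).foldl (fun st c =>
        if !pvVGet st.1 r c && (pvCell grid r c == 0) && !blocked_areas.contains (r, c) then
          let bfs := pvBfs grid blocked_areas [(r, c)] (pvVSet st.1 r c) 0
          (bfs.1, st.2 ++ [bfs.2])
        else st) st)
    (fun (st : PySem.Set (Int × Int) × List Int) r =>
      (PySem.List.pyRange 0 ((pvRow grid r).length : Int) 1).foldl (fun st c =>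
        if !PySem.Set.contains st.1 (r, c) && pvOpen grid r c blocked_areas then
          let comp := pvClosure grid blocked_areas ((grid.map List.length).sum + 1)
              (PySem.Set.ofList [(r, c)])
          (PySem.Set.union st.1 comp, st.2 ++ [(comp.length : Int)])
        else st) st)
    ?_
    (grid.map (fun row => List.replicate row.length false), ([] : List Int))
    ((PySem.Set.empty : PySem.Set (Int × Int)), ([] : List Int))
    (pvInit_rel grid blocked_areas)
  · exact h.2.1
  · intro sA sB r hr hrel
    rw [PySem.List.mem_pyRange_one] at hr
    apply pvFoldl_rel (pvRel grid blocked_areas) _ _ _ ?_ sA sB hrel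
    intro tA tB c hcm hrel2
    rw [PySem.List.mem_pyRange_one] at hcm
    exact pvCellStep grid blocked_areas r c ⟨hr.1, hr.2, hcm.1, hcm.2⟩ tA tB hrel2

-- ===== VERDICT (by name: the statement is the Claim_ definition above) =====
theorem find_contiguous_regions_spec : Claim_equal_find_contiguous_regions := by
  intro grid blocked_areas _
  exact find_contiguous_regions_spec' grid blocked_areas
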